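-- pv_equiv track=rewrite | github.com/jearldean/AoC | main.py | score_one_completion_string
-- ===== SOURCE A (Python) =====
-- def score_one_completion_string(completion_string):
--     """
--     For sample '])}>'
--     Start with a total score of 0.
--     Multiply the total score by 5 to get 0, then add the value of ] (2) to get a new total score of 2.
--     Multiply the total score by 5 to get 10, then add the value of ) (1) to get a new total score of 11.
--     Multiply the total score by 5 to get 55, then add the value of } (3) to get a new total score of 58.
--     Multiply the total score by 5 to get 290, then add the value of > (4) to get a new total score of 294.
--
--     >>> elf_help = ElfSub()
--     >>> elf_help.score_one_completion_string('}}]])})]')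
--     288957
--     >>> elf_help.score_one_completion_string(')}>]})')
--     5566
--     >>> elf_help.score_one_completion_string('}}>}>))))')
--     1480781
--     >>> elf_help.score_one_completion_string(']]}}]}]}>')
--     995444
--     >>> elf_help.score_one_completion_string('])}>')
--     294
--     """
--     points = {")": 1,
--               "]": 2,
--               "}": 3,
--               ">": 4}
--     total_score = 0
--     multiplier = 5
--     for i in range(len(completion_string)):
--         total_score = (total_score * multiplier) + points[completion_string[i]]
--     return total_score
-- ===== SOURCE B (Python) =====
-- def score_one_completion_string(completion_string):
--     if not completion_string:
--         return 0
--     digit = {")": "1", "]": "2", "}": "3", ">": "4"}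
--     return int("".join(digit[c] for c in completion_string), 5)
-- ===== Notes on version B (the rewrite author's own statement) =====
-- stated objective: idiomatic
-- what changed: Replaces the explicit Horner multiply-add index loop with mapping each closer to its base-5 digit character, joining them, and converting with a single int(digits, 5) library call (empty string guarded to 0).
import Mathlib
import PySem

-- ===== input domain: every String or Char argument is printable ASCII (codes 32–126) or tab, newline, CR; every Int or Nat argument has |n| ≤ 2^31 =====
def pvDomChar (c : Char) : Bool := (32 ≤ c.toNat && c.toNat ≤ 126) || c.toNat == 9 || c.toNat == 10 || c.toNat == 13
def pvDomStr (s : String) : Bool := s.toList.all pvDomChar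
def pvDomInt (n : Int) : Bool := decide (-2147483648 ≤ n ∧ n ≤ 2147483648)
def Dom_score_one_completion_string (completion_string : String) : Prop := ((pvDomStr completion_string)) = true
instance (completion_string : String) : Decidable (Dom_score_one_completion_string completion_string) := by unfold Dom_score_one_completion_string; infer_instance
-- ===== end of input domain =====

-- B maps each closer to a base-5 digit character and converts the joined digit string with int(·, 5) (idiomatic library-call form; empty string guarded to 0).

-- ===== PORT A =====
-- the 'points' dict of A
def pvPointsA : PySem.Dict Char Int :=
  PySem.Dict.ofList [(')', 1), (']', 2), ('}', 3), ('>', 4)]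

-- A's loop: for i in range(len(s)): total = total*5 + points[s[i]]
-- (points[...] raises KeyError on other characters — excluded by Pre_; the port uses getD 0 there)
def score_one_completion_string (completion_string : String) : Int :=
  (PySem.List.pyRange 0 (PySem.Str.len completion_string) 1).foldl
    (fun total i => total * 5 + pvPointsA.getD (PySem.List.pyGetD completion_string.toList i ' ') 0) 0

-- ===== PORT B =====
-- the 'digit' dict of B (closer → base-5 digit character)
def pvDigitB : PySem.Dict Char Char :=
  PySem.Dict.ofList [(')', '1'), (']', '2'), ('}', '3'), ('>', '4')]

-- hand port of int(ds, 5): standard positional base-5 parse of a digit string; exact for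
-- strings of digits '0'..'4', which is all the mapped join can produce under Pre_
def pvIntBase5 (ds : List Char) : Int :=
  ds.foldl (fun acc c => acc * 5 + ((c.toNat : Int) - 48)) 0

-- B: if not s: return 0; return int("".join(digit[c] for c in s), 5)
def score_one_completion_string_alt (completion_string : String) : Int :=
  if completion_string.toList.isEmpty then 0
  else pvIntBase5 (completion_string.toList.map (fun c => pvDigitB.getD c ' '))

-- ===== PRECONDITION & SPEC =====
-- Pre_ excludes strings containing a character other than ) ] } > — on those Python A raises KeyError (B raises too).
def Pre_score_one_completion_string (completion_string : String) : Prop :=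
  (completion_string.toList.all (fun c => c == ')' || c == ']' || c == '}' || c == '>')) = true
instance (completion_string : String) : Decidable (Pre_score_one_completion_string completion_string) := by unfold Pre_score_one_completion_string; infer_instance

def pvWitness_score_one_completion_string : String := "])}>"

def Spec_score_one_completion_string (completion_string : String) (out : Int) : Prop := out = score_one_completion_string_alt completion_string
instance (completion_string : String) (out : Int) : Decidable (Spec_score_one_completion_string completion_string out) := by unfold Spec_score_one_completion_string; infer_instance

-- ===== CLAIM (what is proved, stated in full; the proofs are below) =====
def Claim_equal_score_one_completion_string : Prop := ∀ (completion_string : String), Dom_score_one_completion_string completion_string → Pre_score_one_completion_string completion_string → Spec_score_one_completion_string completion_string (score_one_completion_string completion_string)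

-- ===== LEMMAS AND PROOFS =====

-- ===== VERDICT (by name: the statement is the Claim_ definition above) =====
theorem score_one_completion_string_spec : Claim_equal_score_one_completion_string := by
  intro s _ hpre
  unfold Spec_score_one_completion_string score_one_completion_string score_one_completion_string_alt pvIntBase5
  have hlen : PySem.Str.len s = (s.toList.length : Int) := by simp [PySem.Str.len_eq]
  rw [hlen,
    PySem.List.foldl_pyRange_zero_pyGetD' s.toList ' '
      (fun t c => t * 5 + pvPointsA.getD c 0) 0,
    List.foldl_map]
  by_cases hnil : s.toList.isEmpty
  · simp_all [List.isEmpty_iff]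
  · simp only [hnil]
    apply PySem.List.foldl_congr_mem
    intro acc c hc
    have hc4 : ((c = ')' ∨ c = ']') ∨ c = '}') ∨ c = '>' := by
      simpa using List.all_eq_true.mp hpre c hc
    rcases hc4 with ((rfl | rfl) | rfl) | rfl <;> rfl
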